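-- pv_equiv track=rewrite | github.com/Rylie-W/LeetRecord | SlidingWindows/Leetcode1477.py | minSumOfLengths
-- ===== SOURCE A (Python) =====
-- def minSumOfLengths(arr, target: int) -> int:
--     res = []
--     for i in range(len(arr)):
--         right=i
--         count=0
--         while right<len(arr):
--             count+=arr[right]
--             right+=1
--             if count==target:
--                 if len(res) == 0:
--                     res.append(right - i)
--                 elif len(res) == 1:
--                     if right - i > res[0]:
--                         res.append(right - i)
--                     else:
--                         res = [right - i] + res
--                 else:
--                     if right - i < res[0]:
--                         res = [right - i] + res
--                         res.pop()
--                     elif right - i < res[-1]: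
--                         res.pop()
--                         res.append(right - i)
--     # left = right = 0
--     # count = 0
--     # while right < len(arr):
--     #     c = arr[right]
--     #     right += 1
--     #     count += c
--     #     if count == target:
--     #         if len(res) == 0:
--     #             res.append(right - left)
--     #         elif len(res) == 1:
--     #             if right - left > res[0]:
--     #                 res.append(right - left)
--     #             else:
--     #                 res = [right - left] + res
--     #         else:
--     #             if right - left < res[0]:
--     #                 res = [right - left] + res
--     #                 res.pop()
--     #             elif right - left < res[-1]:
--     #                 res.pop()
--     #                 res.append(right - left)
--     #         left = right
--     #         count = 0
--     #     elif count > target: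
--     #         while count > target and left < len(arr):
--     #             count -= arr[left]
--     #             left += 1
--     #         if count == target:
--     #             if len(res) == 0:
--     #                 res.append(right - left)
--     #             elif len(res) == 1:
--     #                 if right - left > res[0]:
--     #                     res.append(right - left)
--     #                 else:
--     #                     res = [right - left] + res
--     #             else:
--     #                 if right - left < res[0]:
--     #                     res = [right - left] + res
--     #                     res.pop()
--     #                 elif right - left < res[-1]:
--     #                     res.pop()
--     #                     res.append(right - left)
--     #             left = right
--     #             count = 0
--
--     return sum(res) if len(res) == 2 else -1
-- ===== SOURCE B (Python) =====
-- def minSumOfLengths(arr, target: int) -> int: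
--     # prefix sums once, collect all qualifying subarray lengths, sort, sum the two smallest
--     pre = [0]
--     for x in arr:
--         pre.append(pre[-1] + x)
--     n = len(arr)
--     lengths = sorted(r - i for i in range(n) for r in range(i + 1, n + 1)
--                      if pre[r] - pre[i] == target)
--     return lengths[0] + lengths[1] if len(lengths) >= 2 else -1
-- ===== Notes on version B (the rewrite author's own statement) =====
-- stated objective: alternative
-- what changed: B replaces A's incremental running-count scan with bespoke two-smallest list surgery by a prefix-sum table, a comprehension collecting all qualifying subarray lengths, and a library sort taking the two smallest.
import Mathlib
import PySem

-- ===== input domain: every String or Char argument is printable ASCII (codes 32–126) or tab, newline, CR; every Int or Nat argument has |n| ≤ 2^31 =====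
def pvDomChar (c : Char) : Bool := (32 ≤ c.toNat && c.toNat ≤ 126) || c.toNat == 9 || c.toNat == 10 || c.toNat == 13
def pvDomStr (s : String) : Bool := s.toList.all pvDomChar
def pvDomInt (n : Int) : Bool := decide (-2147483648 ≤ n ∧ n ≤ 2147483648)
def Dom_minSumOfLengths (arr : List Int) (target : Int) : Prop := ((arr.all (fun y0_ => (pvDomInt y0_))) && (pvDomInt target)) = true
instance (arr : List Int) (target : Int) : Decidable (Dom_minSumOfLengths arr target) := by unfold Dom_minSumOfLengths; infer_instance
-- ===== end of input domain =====

-- B collects all qualifying subarray lengths via a prefix-sum table and sorts them, instead of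
-- A's running-count scan maintaining the two smallest by hand; same value, alternative algorithm.

-- ===== PORT A =====
-- the res-update block of A, verbatim (append / prepend+pop / pop+append surgery)
def updA (res : List Int) (L : Int) : List Int :=
  if res.length = 0 then res ++ [L]
  else if res.length = 1 then
    (if L > PySem.List.pyGetD res 0 0 then res ++ [L] else [L] ++ res)
  else
    if L < PySem.List.pyGetD res 0 0 then ([L] ++ res).dropLast
    else if L < PySem.List.pyGetD res (-1) 0 then res.dropLast ++ [L]
    else res

-- A's inner 'while right < len(arr)' loop; fuel bounds the iterations (n - right ≤ fuel holds at every call)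
def innerA (arr : List Int) (target i right count : Int) (res : List Int) (fuel : Nat) : List Int :=
  match fuel with
  | 0 => res
  | fuel' + 1 =>
    if right < PySem.List.len arr then
      let count' := count + PySem.List.pyGetD arr right 0
      let right' := right + 1
      let res' := if count' = target then updA res (right' - i) else res
      innerA arr target i right' count' res' fuel'
    else res

def minSumOfLengths (arr : List Int) (target : Int) : Int :=
  let res := (PySem.List.pyRange 0 (PySem.List.len arr) 1).foldl
      (fun res i => innerA arr target i i 0 res arr.length) []
  if res.length = 2 then res.sum else -1

-- ===== PORT B =====
def minSumOfLengths_alt (arr : List Int) (target : Int) : Int :=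
  let pre := arr.foldl (fun p x => p ++ [PySem.List.pyGetD p (-1) 0 + x]) [0]
  let n := PySem.List.len arr
  let lengths := PySem.List.sorted
    ((PySem.List.pyRange 0 n 1).flatMap (fun i =>
      (PySem.List.pyRange (i + 1) (n + 1) 1).filterMap (fun r =>
        if PySem.List.pyGetD pre r 0 - PySem.List.pyGetD pre i 0 = target then some (r - i)
        else none)))
    (fun x => x) false
  if 2 ≤ lengths.length then PySem.List.pyGetD lengths 0 0 + PySem.List.pyGetD lengths 1 0
  else -1

-- ===== PRECONDITION & SPEC =====
def Spec_minSumOfLengths (arr : List Int) (target : Int) (out : Int) : Prop := out = minSumOfLengths_alt arr target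
instance (arr : List Int) (target : Int) (out : Int) : Decidable (Spec_minSumOfLengths arr target out) := by unfold Spec_minSumOfLengths; infer_instance

-- ===== CLAIM (what is proved, stated in full; the proofs are below) =====
def Claim_equal_minSumOfLengths : Prop := ∀ (arr : List Int) (target : Int), Dom_minSumOfLengths arr target → Spec_minSumOfLengths arr target (minSumOfLengths arr target)

-- ===== LEMMAS AND PROOFS =====

-- B's prefix-sum list, named for the proofs
def preL (arr : List Int) : List Int := arr.foldl (fun p x => p ++ [PySem.List.pyGetD p (-1) 0 + x]) [0]

theorem preL_eq (arr : List Int) :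
    preL arr = (List.range (arr.length + 1)).map (fun k => ((arr.take k).sum : Int)) := by
  induction arr using List.reverseRecOn with
  | nil => rfl
  | append_singleton as x ih =>
      unfold preL at ih ⊢
      rw [List.foldl_append, ih]
      rw [show as.length + 1 = (as.length + 1 - 1) + 1 from rfl, List.range_succ]
      simp only [List.map_append, List.foldl_cons, List.foldl_nil, List.map_cons, List.map_nil,
        PySem.List.pyGetD_neg_one_append_singleton]
      rw [List.length_append, List.length_singleton, List.range_succ, List.map_append]
      congr 1
      · rw [List.range_succ, List.map_append]
        congr 1
        · apply List.map_congr_left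
          intro k hk
          rw [List.mem_range] at hk
          rw [List.take_append_of_le_length (by omega)]
        · simp [List.take_append_of_le_length (le_refl as.length)]
      · simp

theorem preL_get (arr : List Int) (j : Int) (h0 : 0 ≤ j) (h1 : j ≤ (arr.length : Int)) :
    PySem.List.pyGetD (preL arr) j 0 = (arr.take j.toNat).sum := by
  rw [preL_eq]
  rw [PySem.List.pyGetD_eq_getElem _ _ h0 (by simp; omega)]
  simp


theorem innerA_eq (arr : List Int) (target i : Int) :
    ∀ (fuel : Nat) (j : Int) (res : List Int), 0 ≤ j → j ≤ (arr.length : Int) →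
      (arr.length : Int) - j ≤ (fuel : Int) →
      innerA arr target i j (PySem.List.pyGetD (preL arr) j 0 - PySem.List.pyGetD (preL arr) i 0) res fuel
        = (PySem.List.pyRange (j + 1) ((arr.length : Int) + 1) 1).foldl
            (fun res r =>
              if PySem.List.pyGetD (preL arr) r 0 - PySem.List.pyGetD (preL arr) i 0 = target
              then updA res (r - i) else res) res := by
  intro fuel
  induction fuel with
  | zero =>
      intro j res h0 h1 hf
      have hj : j = (arr.length : Int) := by simpa using le_antisymm h1 (by omega)
      subst hj
      rw [PySem.List.pyRange_one_eq_nil (by omega)]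
      rfl
  | succ fuel ih =>
      intro j res h0 h1 hf
      by_cases hj : j < (arr.length : Int)
      · have hstep : PySem.List.pyGetD (preL arr) (j + 1) 0
            = PySem.List.pyGetD (preL arr) j 0 + PySem.List.pyGetD arr j 0 := by
          rw [preL_get _ _ (by omega) (by omega), preL_get _ _ h0 h1,
            PySem.List.pyGetD_eq_getElem _ _ h0 (by omega)]
          have ht : (j + 1).toNat = j.toNat + 1 := by omega
          rw [ht, List.take_add_one, List.sum_append,
            List.getElem?_eq_getElem (by omega : j.toNat < arr.length)]
          simp
        have hcount : PySem.List.pyGetD (preL arr) j 0 - PySem.List.pyGetD (preL arr) i 0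
              + PySem.List.pyGetD arr j 0
            = PySem.List.pyGetD (preL arr) (j + 1) 0 - PySem.List.pyGetD (preL arr) i 0 := by
          rw [hstep]; ring
        rw [PySem.List.pyRange_one_cons (by omega : j + 1 < (arr.length : Int) + 1),
          List.foldl_cons]
        show innerA arr target i j _ res (fuel + 1) = _
        simp only [innerA, PySem.List.len_eq, if_pos hj, hcount]
        exact ih (j + 1) _ (by omega) (by omega) (by push_cast at hf ⊢; omega)
      · have hj' : j = (arr.length : Int) := by omega
        subst hj'
        rw [PySem.List.pyRange_one_eq_nil (by omega)]
        simp only [innerA, PySem.List.len_eq]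
        rw [if_neg (by omega)]
        rfl

theorem sorted_snoc (m : List Int) (x : Int) :
    PySem.List.sorted (m ++ [x]) (fun y => y) false
      = List.orderedInsert (· ≤ ·) x (PySem.List.sorted m (fun y => y) false) := by
  apply PySem.List.sorted_id_eq_of_perm_of_pairwise
  · exact ((List.perm_orderedInsert _ x _).trans
      ((PySem.List.sorted_perm m _ false).cons x)).trans (List.perm_append_singleton x m).symm
  · exact List.Pairwise.orderedInsert x _ (PySem.List.sorted_pairwise m (fun y => y))

theorem updA_step (m : List Int) (x : Int) :
    updA ((PySem.List.sorted m (fun y => y) false).take 2) x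
      = (PySem.List.sorted (m ++ [x]) (fun y => y) false).take 2 := by
  rw [sorted_snoc]
  have hs := PySem.List.sorted_pairwise m (fun y => y)
  rcases hsl : PySem.List.sorted m (fun y => y) false with _ | ⟨a, _ | ⟨b, t⟩⟩
  · simp [updA, List.orderedInsert]
  · rcases le_or_gt x a with hxa | hxa
    · simp [updA, List.orderedInsert, hxa, not_lt.mpr hxa]
    · simp [updA, List.orderedInsert, hxa, not_le.mpr hxa]
  · rw [hsl] at hs
    have hab : a ≤ b := (List.pairwise_cons.mp hs).1 b (by simp)
    have hb : PySem.List.pyGetD [a, b] (-1) (0 : Int) = b :=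
      PySem.List.pyGetD_neg_one_append_singleton [a] b 0
    simp only [List.take_succ_cons, List.take_zero, List.orderedInsert, updA,
      List.length_cons, List.length_nil, PySem.List.pyGetD_zero_cons, hb]
    split_ifs <;> simp_all <;> omega

theorem foldl_flatMap' {α β γ : Type} (g : β → α → β) (h : γ → List α) (l : List γ) (init : β) :
    (l.flatMap h).foldl g init = l.foldl (fun acc x => (h x).foldl g acc) init := by
  induction l generalizing init with
  | nil => rfl
  | cons x l ih => simp [List.foldl_append, ih]

theorem foldl_ite_updA (c : Int → Prop) [DecidablePred c] (i : Int) (l : List Int) (res : List Int) :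
    l.foldl (fun res r => if c r then updA res (r - i) else res) res
      = (l.filterMap (fun r => if c r then some (r - i) else none)).foldl updA res := by
  induction l generalizing res with
  | nil => rfl
  | cons x l ih => by_cases h : c x <;> simp [h, ih]

theorem fold_updA (l m : List Int) :
    l.foldl updA ((PySem.List.sorted m (fun y => y) false).take 2)
      = (PySem.List.sorted (m ++ l) (fun y => y) false).take 2 := by
  induction l generalizing m with
  | nil => simp
  | cons x l ih =>
      rw [List.foldl_cons, updA_step, ih (m ++ [x])]
      simp

theorem main_eq (arr : List Int) (target : Int) :
    minSumOfLengths arr target = minSumOfLengths_alt arr target := by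
  simp only [minSumOfLengths, minSumOfLengths_alt, PySem.List.len_eq]
  rw [show (List.foldl (fun p x => p ++ [PySem.List.pyGetD p (-1) 0 + x]) [0] arr) = preL arr from rfl]
  have hres : (PySem.List.pyRange 0 (arr.length : Int) 1).foldl
      (fun res i => innerA arr target i i 0 res arr.length) []
      = ((PySem.List.pyRange 0 (arr.length : Int) 1).flatMap (fun i =>
          (PySem.List.pyRange (i + 1) ((arr.length : Int) + 1) 1).filterMap (fun r =>
            if PySem.List.pyGetD (preL arr) r 0 - PySem.List.pyGetD (preL arr) i 0 = target
            then some (r - i) else none))).foldl updA [] := by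
    rw [foldl_flatMap']
    apply List.foldl_ext
    intro res i hi
    rw [PySem.List.mem_pyRange_one] at hi
    have h0 : innerA arr target i i 0 res arr.length
        = innerA arr target i i
            (PySem.List.pyGetD (preL arr) i 0 - PySem.List.pyGetD (preL arr) i 0) res arr.length := by
      rw [sub_self]
    rw [h0, innerA_eq arr target i arr.length i res hi.1 (by omega) (by omega),
      foldl_ite_updA (fun r => PySem.List.pyGetD (preL arr) r 0 - PySem.List.pyGetD (preL arr) i 0 = target)]
  rw [hres]
  have h2 : ([] : List Int) = (PySem.List.sorted ([] : List Int) (fun y => y) false).take 2 := rfl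
  rw [h2, fold_updA]
  simp only [List.nil_append]
  rcases hsl : PySem.List.sorted _ (fun y => y) false with _ | ⟨a, _ | ⟨b, t⟩⟩
  · rfl
  · rfl
  · have h1 : PySem.List.pyGetD (a :: b :: t) 1 0 = b := by
      rw [show (1 : Int) = ((1 : Nat) : Int) from rfl, PySem.List.pyGetD_natCast]
      rfl
    simp [h1, PySem.List.pyGetD_zero_cons]

-- ===== VERDICT (by name: the statement is the Claim_ definition above) =====
theorem minSumOfLengths_spec : Claim_equal_minSumOfLengths := by
  intro arr target _
  unfold Spec_minSumOfLengths
  exact main_eq arr target
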